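-- pv_equiv track=rewrite | github.com/tmanuszak/ProjectEuler | P054.py | fcheck
-- ===== SOURCE A (Python) =====
-- def fcheck(h1, h2):
--     if len(set(h1[1])) == 1 and len(set(h2[1])) == 1: #tie
--         h1[0] = [cardval.index(h1[0][i]) for i in range(0, 5)]
--         h2[0] = [cardval.index(h2[0][i]) for i in range(0, 5)]
--         return hcheck(h1, h2)
--     elif len(set(h1[1])) == 1:
--         return 1
--     elif len(set(h2[1])) == 1:
--         return 2
--     return 0
--
-- def hcheck(h1, h2):
--     h1[0].sort()
--     h2[0].sort()
--     if len(h1[0]) > 0: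
--         if h1[0][-1] == h2[0][-1]:
--             h1[0] = h1[0][0:-1]
--             h2[0] = h2[0][0:-1]
--             return hcheck(h1, h2)
--         elif h1[0][-1] > h2[0][-1]:
--             return 1
--         elif h2[0][-1] > h1[0][-1]:
--             return 2
--     return 0
--
-- cardval = ['2', '3', '4', '5', '6', '7', '8', '9', 'T', 'J', 'Q', 'K', 'A']
-- ===== SOURCE B (Python) =====
-- cardval = ['2', '3', '4', '5', '6', '7', '8', '9', 'T', 'J', 'Q', 'K', 'A']
--
-- # Return-value equivalence only: A mutates h1[0]/h2[0] in place, B does not.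
-- def fcheck(h1, h2):
--     f1 = len(set(h1[1])) == 1
--     f2 = len(set(h2[1])) == 1
--     if f1 and f2:
--         r1 = sorted(cardval.index(c) for c in h1[0][:5])[::-1]
--         r2 = sorted(cardval.index(c) for c in h2[0][:5])[::-1]
--         if r1 > r2:
--             return 1
--         if r2 > r1:
--             return 2
--         return 0
--     if f1:
--         return 1
--     if f2:
--         return 2
--     return 0
-- ===== Notes on version B (the rewrite author's own statement) =====
-- stated objective: alternative
-- what changed: The recursive hcheck (re-sort both lists, compare and strip the last element, recurse) is replaced by one descending-sorted pass per hand followed by a single lexicographic list comparison; B also does not mutate its arguments (A sorts/truncates h1[0], h2[0] in place).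
import Mathlib
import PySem

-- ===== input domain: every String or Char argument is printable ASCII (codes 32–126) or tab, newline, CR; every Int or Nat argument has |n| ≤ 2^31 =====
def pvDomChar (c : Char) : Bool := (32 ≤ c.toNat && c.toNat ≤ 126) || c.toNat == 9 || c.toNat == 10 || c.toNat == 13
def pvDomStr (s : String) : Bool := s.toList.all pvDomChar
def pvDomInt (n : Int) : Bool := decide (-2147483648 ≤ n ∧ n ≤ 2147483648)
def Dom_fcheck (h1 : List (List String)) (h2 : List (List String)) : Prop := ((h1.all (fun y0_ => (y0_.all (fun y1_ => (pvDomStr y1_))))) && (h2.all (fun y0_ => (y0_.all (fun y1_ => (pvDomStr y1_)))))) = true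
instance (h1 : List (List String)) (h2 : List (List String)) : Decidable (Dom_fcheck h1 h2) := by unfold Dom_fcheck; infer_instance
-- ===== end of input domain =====

-- B replaces A's recursive strip-the-top-card tie loop by one descending sort per hand and a single
-- lexicographic comparison; equivalence is about the RETURN value only (A mutates h1[0]/h2[0] in place, B does not).

-- ===== PORT A =====
def cardval : List String := ["2", "3", "4", "5", "6", "7", "8", "9", "T", "J", "Q", "K", "A"]

-- [cardval.index(h[0][i]) for i in range(0, 5)] ; none = IndexError/ValueError (excluded by Pre_)
def idx5A (r : List String) : Option (List Int) :=
  (PySem.List.pyRange 0 5 1).mapM (fun i =>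
    (PySem.List.pyGet? r i).bind (fun c => (PySem.List.index? cardval c).map (fun n => (n : Int))))

def hcheckA (a b : List Int) : Int :=
  let a' := PySem.List.sorted a (fun x => x) false
  let b' := PySem.List.sorted b (fun x => x) false
  if h5 : 0 < a'.length then
    match PySem.List.pyGet? a' (-1), PySem.List.pyGet? b' (-1) with
    | some x, some y =>
      if x = y then
        hcheckA (PySem.List.slice a' none (some (-1))) (PySem.List.slice b' none (some (-1)))
      else if x > y then 1
      else if y > x then 2
      else 0
    | _, _ => 0      -- h2[0][-1] IndexError (excluded by Pre_)
  else 0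
termination_by a.length
decreasing_by
  simp only [PySem.List.slice_to_neg_one]
  have hl : (PySem.List.sorted a (fun x => x) false).length = a.length := PySem.List.length_sorted ..
  rw [List.length_dropLast, hl]; rw [hl] at h5; omega

def fcheck (h1 : List (List String)) (h2 : List (List String)) : Int :=
  match PySem.List.pyGet? h1 1, PySem.List.pyGet? h2 1 with
  | some s1, some s2 =>
    if (PySem.Set.ofList s1).length = 1 ∧ (PySem.Set.ofList s2).length = 1 then
      match PySem.List.pyGet? h1 0, PySem.List.pyGet? h2 0 with
      | some r1, some r2 =>
        match idx5A r1, idx5A r2 with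
        | some a, some b => hcheckA a b
        | _, _ => 0      -- ValueError/IndexError in the comprehension (excluded by Pre_)
      | _, _ => 0        -- unreachable: pyGet? at 1 succeeded
    else if (PySem.Set.ofList s1).length = 1 then 1
    else if (PySem.Set.ofList s2).length = 1 then 2
    else 0
  | _, _ => 0            -- h[1] IndexError (excluded by Pre_)

-- ===== PORT B =====
-- sorted(cardval.index(c) for c in h[0][:5]) ; none = ValueError (excluded by Pre_)
def idx5B (r : List String) : Option (List Int) :=
  (PySem.List.slice r none (some 5)).mapM
    (fun c => (PySem.List.index? cardval c).map (fun n => (n : Int)))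

-- Python's list '>' (lexicographic, shorter list is smaller)
def lexGT : List Int → List Int → Bool
  | [], _ => false
  | _ :: _, [] => true
  | x :: xs, y :: ys => if y < x then true else if x < y then false else lexGT xs ys

def fcheck_alt (h1 : List (List String)) (h2 : List (List String)) : Int :=
  match PySem.List.pyGet? h1 1, PySem.List.pyGet? h2 1 with
  | some s1, some s2 =>
    let f1 := (PySem.Set.ofList s1).length = 1
    let f2 := (PySem.Set.ofList s2).length = 1
    if f1 ∧ f2 then
      match PySem.List.pyGet? h1 0, PySem.List.pyGet? h2 0 with
      | some c1, some c2 =>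
        match idx5B c1, idx5B c2 with
        | some a, some b =>
          let r1 := (PySem.List.sorted a (fun x => x) false).reverse
          let r2 := (PySem.List.sorted b (fun x => x) false).reverse
          if lexGT r1 r2 then 1 else if lexGT r2 r1 then 2 else 0
        | _, _ => 0
      | _, _ => 0
    else if f1 then 1 else if f2 then 2 else 0
  | _, _ => 0

-- ===== PRECONDITION & SPEC =====
-- Pre_ excludes exactly the inputs where the Python A raises: a hand list without a suit entry
-- (h[1] IndexError), and — when both hands are flushes, so the tie branch runs — a rank list with
-- fewer than 5 cards (IndexError) or a rank among the first five not in cardval (ValueError).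
def Pre_fcheck (h1 : List (List String)) (h2 : List (List String)) : Prop :=
  2 ≤ h1.length ∧ 2 ≤ h2.length ∧
  (((PySem.Set.ofList (h1.getD 1 [])).length = 1 ∧ (PySem.Set.ofList (h2.getD 1 [])).length = 1) →
    ((5 ≤ (h1.getD 0 []).length ∧ ∀ c ∈ (h1.getD 0 []).take 5, c ∈ cardval) ∧
     (5 ≤ (h2.getD 0 []).length ∧ ∀ c ∈ (h2.getD 0 []).take 5, c ∈ cardval)))
instance (h1 : List (List String)) (h2 : List (List String)) : Decidable (Pre_fcheck h1 h2) := by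
  unfold Pre_fcheck; infer_instance

def pvWitness_fcheck : List (List String) × List (List String) :=
  ([["2", "3", "4", "5", "6"], ["S"]], [["2", "3", "4", "5", "7"], ["H"]])

def Spec_fcheck (h1 : List (List String)) (h2 : List (List String)) (out : Int) : Prop := out = fcheck_alt h1 h2
instance (h1 : List (List String)) (h2 : List (List String)) (out : Int) : Decidable (Spec_fcheck h1 h2 out) := by unfold Spec_fcheck; infer_instance

-- ===== CLAIM (what is proved, stated in full; the proofs are below) =====
def Claim_equal_fcheck : Prop := ∀ (h1 : List (List String)) (h2 : List (List String)), Dom_fcheck h1 h2 → Pre_fcheck h1 h2 → Spec_fcheck h1 h2 (fcheck h1 h2)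

-- ===== LEMMAS AND PROOFS =====

lemma idx_eq (r : List String) (h : 5 ≤ r.length) : idx5A r = idx5B r := by
  rcases r with _ | ⟨c1, r⟩; · simp at h
  rcases r with _ | ⟨c2, r⟩; · simp at h
  rcases r with _ | ⟨c3, r⟩; · simp at h
  rcases r with _ | ⟨c4, r⟩; · simp at h
  rcases r with _ | ⟨c5, r⟩; · simp at h
  have hr : PySem.List.pyRange 0 5 1 = [0, 1, 2, 3, 4] := by decide
  have hs : PySem.List.slice (c1 :: c2 :: c3 :: c4 :: c5 :: r) none (some 5) =
      [c1, c2, c3, c4, c5] := by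
    rw [PySem.List.slice_to _ (by norm_num)]; rfl
  have i1 : (0 : Int) ≤ ↑r.length + 1 + 1 + 1 + 1 := by omega
  have i2 : (0 : Int) ≤ ↑r.length + 1 + 1 + 1 := by omega
  have i3 : (2 : Int) ≤ ↑r.length + 1 + 1 + 1 + 1 := by omega
  have i4 : (3 : Int) ≤ ↑r.length + 1 + 1 + 1 + 1 := by omega
  have i5 : (4 : Int) ≤ ↑r.length + 1 + 1 + 1 + 1 := by omega
  simp [idx5A, idx5B, hr, hs, List.mapM_cons, List.mapM_nil,
        PySem.List.pyGet?, PySem.List.pyIdx?, i1, i2, i3, i4, i5]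

lemma mapM_len {α β : Type} (f : α → Option β) (l : List α) (l' : List β)
    (h : l.mapM f = some l') : l'.length = l.length := by
  induction l generalizing l' with
  | nil => simp [List.mapM_nil] at h; simp [← h]
  | cons x xs ih =>
    rw [List.mapM_cons] at h
    cases hx : f x <;> simp [hx] at h
    cases hxs : xs.mapM f <;> simp [hxs] at h
    simp [← h, ih _ hxs]

lemma idx5B_len (r : List String) (a : List Int) (h5 : 5 ≤ r.length)
    (h : idx5B r = some a) : a.length = 5 := by
  have hlen := mapM_len _ _ _ h
  rw [PySem.List.slice_to _ (by norm_num)] at hlen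
  simp only [List.length_take] at hlen
  omega

-- hcheck on sorted lists of equal length is the lexicographic comparison of their reverses
lemma hcheck_sorted (n : Nat) : ∀ (a b : List Int), a.length = n → b.length = n →
    a.Pairwise (· ≤ ·) → b.Pairwise (· ≤ ·) →
    hcheckA a b = (if lexGT a.reverse b.reverse then 1 else if lexGT b.reverse a.reverse then 2 else 0) := by
  induction n using Nat.strong_induction_on with
  | _ n ih =>
    intro a b ha hb hpa hpb
    have hsa : PySem.List.sorted a (fun x => x) false = a :=
      PySem.List.sorted_eq_self_of_pairwise a (fun x => x) hpa
    have hsb : PySem.List.sorted b (fun x => x) false = b :=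
      PySem.List.sorted_eq_self_of_pairwise b (fun x => x) hpb
    rw [hcheckA.eq_def]
    simp only [hsa, hsb]
    rcases a.eq_nil_or_concat with rfl | ⟨l, x, rfl⟩
    · rcases b.eq_nil_or_concat with rfl | ⟨m, y, rfl⟩
      · simp [lexGT]
      · simp at ha hb; omega
    · rcases b.eq_nil_or_concat with rfl | ⟨m, y, rfl⟩
      · simp at ha hb; omega
      · simp only [List.concat_eq_append] at ha hb hpa hpb ⊢
        have hx : PySem.List.pyGet? (l ++ [x]) (-1) = some x :=
          PySem.List.pyGet?_neg_one_append_singleton ..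
        have hy : PySem.List.pyGet? (m ++ [y]) (-1) = some y :=
          PySem.List.pyGet?_neg_one_append_singleton ..
        have hrx : (l ++ [x]).reverse = x :: l.reverse := by
          simp
        have hry : (m ++ [y]).reverse = y :: m.reverse := by
          simp
        simp only [List.length_append, List.length_cons, List.length_nil] at ha hb
        rw [dif_pos (by simp)]
        rw [hx, hy]
        dsimp only
        by_cases hxy : x = y
        · subst hxy
          rw [if_pos rfl]
          simp only [PySem.List.slice_to_neg_one, List.dropLast_concat]
          have := ih (n - 1) (by omega) l m (by omega) (by omega)
            (hpa.sublist (by simp)) (hpb.sublist (by simp))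
          rw [this, hrx, hry]
          simp [lexGT]
        · rw [if_neg hxy, hrx, hry]
          rcases lt_trichotomy x y with hlt | heq | hgt
          · simp [lexGT, hlt, not_lt.mpr hlt.le]
          · exact absurd heq hxy
          · simp [lexGT, hgt]

lemma hcheck_eq_lex (a b : List Int) (h : a.length = b.length) :
    hcheckA a b =
      (if lexGT (PySem.List.sorted a (fun x => x) false).reverse
              (PySem.List.sorted b (fun x => x) false).reverse then 1
       else if lexGT (PySem.List.sorted b (fun x => x) false).reverse
              (PySem.List.sorted a (fun x => x) false).reverse then 2 else 0) := by
  have h1 : hcheckA a b = hcheckA (PySem.List.sorted a (fun x => x) false) (PySem.List.sorted b (fun x => x) false) := by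
    conv_lhs => rw [hcheckA.eq_def]
    conv_rhs => rw [hcheckA.eq_def]
    simp only [PySem.List.sorted_sorted]
  rw [h1]
  exact hcheck_sorted (PySem.List.sorted a (fun x => x) false).length _ _ rfl
    (by rw [PySem.List.length_sorted, PySem.List.length_sorted, h])
    (PySem.List.sorted_pairwise (xs := a) (key := fun x => x))
    (PySem.List.sorted_pairwise (xs := b) (key := fun x => x))

-- ===== VERDICT (by name: the statement is the Claim_ definition above) =====
theorem fcheck_spec : Claim_equal_fcheck := by
  intro h1 h2 _ hpre
  obtain ⟨hl1, hl2, htie⟩ := hpre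
  rcases h1 with _ | ⟨r1, h1⟩; · simp at hl1
  rcases h1 with _ | ⟨s1, h1⟩; · simp at hl1
  rcases h2 with _ | ⟨r2, h2⟩; · simp at hl2
  rcases h2 with _ | ⟨s2, h2⟩; · simp at hl2
  simp only [List.getD_cons_succ, List.getD_cons_zero] at htie
  unfold Spec_fcheck fcheck fcheck_alt
  have g11 : PySem.List.pyGet? (r1 :: s1 :: h1) 1 = some s1 := by
    simp [PySem.List.pyGet?, PySem.List.pyIdx?]
  have g12 : PySem.List.pyGet? (r2 :: s2 :: h2) 1 = some s2 := by
    simp [PySem.List.pyGet?, PySem.List.pyIdx?]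
  have g01 : PySem.List.pyGet? (r1 :: s1 :: h1) 0 = some r1 := PySem.List.pyGet?_zero_cons ..
  have g02 : PySem.List.pyGet? (r2 :: s2 :: h2) 0 = some r2 := PySem.List.pyGet?_zero_cons ..
  rw [g11, g12, g01, g02]
  dsimp only
  by_cases hf : (PySem.Set.ofList s1).length = 1 ∧ (PySem.Set.ofList s2).length = 1
  · rw [if_pos hf, if_pos hf]
    obtain ⟨⟨h5a, _⟩, ⟨h5b, _⟩⟩ := htie hf
    rw [idx_eq r1 h5a, idx_eq r2 h5b]
    rcases ha : idx5B r1 with _ | a <;> rcases hb : idx5B r2 with _ | b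
    · rfl
    · rfl
    · rfl
    · exact hcheck_eq_lex a b (by rw [idx5B_len r1 a h5a ha, idx5B_len r2 b h5b hb])
  · rw [if_neg hf, if_neg hf]
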